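-- pv_equiv track=rewrite | github.com/polonecmichal/DeafultRepo | pisomka.py | preloz_text_na_sedu_farbu
-- ===== SOURCE A (Python) =====
-- def preloz_text_na_sedu_farbu(text):
--     hex_chars = ''.join([c for c in text if c.lower() in '0123456789abcdef'])
--     farby = []
--     for i in range(0, len(hex_chars), 2):
--         dvojica = hex_chars[i:i+2]
--         if len(dvojica) != 2:
--             break
--         hodnota = int(dvojica, 16)
--         farby.append((hodnota, hodnota, hodnota))
--     return farby
-- ===== SOURCE B (Python) =====
-- def preloz_text_na_sedu_farbu(text):
--     # Single streaming pass: keep at most one pending hex nibble; emit a gray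
--     # triple each time a second hex char completes a byte. A trailing odd hex
--     # char is simply never emitted.
--     farby = []
--     pending = None
--     for c in text:
--         if c in '0123456789abcdefABCDEF':
--             if pending is None:
--                 pending = c
--             else:
--                 hodnota = int(pending + c, 16)
--                 farby.append((hodnota, hodnota, hodnota))
--                 pending = None
--     return farby
-- ===== Notes on version B (the rewrite author's own statement) =====
-- stated objective: simpler
-- what changed: Replaced A's filter-into-a-string followed by index-stepped slicing with one streaming pass over the text that keeps a single pending-nibble state and emits a gray triple whenever a byte completes.
import Mathlib
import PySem

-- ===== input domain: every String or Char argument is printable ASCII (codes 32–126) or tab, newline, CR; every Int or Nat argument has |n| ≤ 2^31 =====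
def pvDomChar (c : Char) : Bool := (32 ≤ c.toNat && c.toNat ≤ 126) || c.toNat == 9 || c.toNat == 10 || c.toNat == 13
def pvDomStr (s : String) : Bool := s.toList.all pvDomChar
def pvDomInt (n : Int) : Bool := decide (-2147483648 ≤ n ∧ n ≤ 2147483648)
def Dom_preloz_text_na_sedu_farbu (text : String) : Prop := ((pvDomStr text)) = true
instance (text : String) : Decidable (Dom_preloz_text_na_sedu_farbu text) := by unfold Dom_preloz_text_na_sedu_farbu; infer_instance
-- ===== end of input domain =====

-- B replaces A's filter-into-a-string plus index-stepped slicing by one streaming pass with a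
-- pending-nibble state (objective: simpler decomposition; same asymptotic cost).

-- ===== PORT A =====
-- hand port of int(s, 16) for a single hex digit: exact on '0'-'9','a'-'f','A'-'F'
def pvHexDigit (c : Char) : Int :=
  if '0' ≤ c ∧ c ≤ '9' then (c.toNat : Int) - 48
  else if 'a' ≤ c ∧ c ≤ 'f' then (c.toNat : Int) - 87
  else (c.toNat : Int) - 55

-- hand port of int(dvojica, 16) on a two-character string of hex digits (exact there;
-- both programs only ever apply it to two filtered hex characters)
def pvHex2 (cs : List Char) : Int :=
  match cs with
  | [a, b] => 16 * pvHexDigit a + pvHexDigit b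
  | _ => 0

-- c.lower() in '0123456789abcdef'
def pvIsHexA (c : Char) : Bool :=
  PySem.Chars.isIn (PySem.Chars.lower [c]) ("0123456789abcdef".toList)

-- the for-loop over range(0, len(hex_chars), 2) with its break
def pvLoopA (hs : List Char) : List Int → List (Int × Int × Int) → List (Int × Int × Int)
  | [], farby => farby
  | i :: rest, farby =>
    let dvojica := PySem.List.slice hs (some i) (some (i + 2))
    if dvojica.length ≠ 2 then farby
    else
      let hodnota := pvHex2 dvojica
      pvLoopA hs rest (farby ++ [(hodnota, hodnota, hodnota)])

def preloz_text_na_sedu_farbu (text : String) : List (Int × Int × Int) :=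
  let hex_chars := text.toList.filter pvIsHexA
  pvLoopA hex_chars (PySem.List.pyRange 0 (hex_chars.length : Int) 2) []

-- ===== PORT B =====
-- c in '0123456789abcdefABCDEF'
def pvIsHexB (c : Char) : Bool :=
  PySem.Chars.isIn [c] ("0123456789abcdefABCDEF".toList)

-- the streaming pass: `pending` holds the waiting first nibble, if any
def pvLoopB : List Char → Option Char → List (Int × Int × Int) → List (Int × Int × Int)
  | [], _, farby => farby
  | c :: rest, pending, farby =>
    if pvIsHexB c then
      match pending with
      | none => pvLoopB rest (some c) farby
      | some p =>
        let hodnota := pvHex2 [p, c]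
        pvLoopB rest none (farby ++ [(hodnota, hodnota, hodnota)])
    else pvLoopB rest pending farby

def preloz_text_na_sedu_farbu_alt (text : String) : List (Int × Int × Int) :=
  pvLoopB text.toList none []

-- ===== PRECONDITION & SPEC =====
def Spec_preloz_text_na_sedu_farbu (text : String) (out : List (Int × Int × Int)) : Prop := out = preloz_text_na_sedu_farbu_alt text
instance (text : String) (out : List (Int × Int × Int)) : Decidable (Spec_preloz_text_na_sedu_farbu text out) := by unfold Spec_preloz_text_na_sedu_farbu; infer_instance

-- ===== CLAIM (what is proved, stated in full; the proofs are below) =====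
def Claim_equal_preloz_text_na_sedu_farbu : Prop := ∀ (text : String), Dom_preloz_text_na_sedu_farbu text → Spec_preloz_text_na_sedu_farbu text (preloz_text_na_sedu_farbu text)

-- ===== LEMMAS AND PROOFS =====

-- common description of both results: pair up a hex-char list, dropping a trailing odd char
def pvPairs : List Char → List (Int × Int × Int)
  | a :: b :: rest =>
    let h := pvHex2 [a, b]
    (h, h, h) :: pvPairs rest
  | _ => []

-- the two membership tests agree on every domain character
lemma pv_hex_eq_all :
    ((List.range 127).map Char.ofNat).all (fun c => pvIsHexA c == pvIsHexB c) = true := by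
  decide

lemma pv_hex_eq (c : Char) (h : pvDomChar c = true) : pvIsHexA c = pvIsHexB c := by
  have hlt : c.toNat < 127 := by
    simp [pvDomChar] at h
    omega
  have hmem : c ∈ (List.range 127).map Char.ofNat :=
    List.mem_map.mpr ⟨c.toNat, List.mem_range.mpr hlt, Char.ofNat_toNat c⟩
  have := List.all_eq_true.mp pv_hex_eq_all c hmem
  exact beq_iff_eq.mp this

-- step-2 range peels its head
lemma pv_pyRange_two_cons {j n : Int} (h : j < n) :
    PySem.List.pyRange j n 2 = j :: PySem.List.pyRange (j + 2) n 2 := by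
  rw [PySem.List.pyRange_of_pos _ _ (by norm_num), PySem.List.pyRange_of_pos _ _ (by norm_num)]
  have hcount : ((n - j + 2 - 1) / 2).toNat
      = (if j + 2 < n then ((n - (j + 2) + 2 - 1) / 2).toNat else 0) + 1 := by
    split_ifs <;> omega
  rw [if_pos h, hcount, List.range_succ_eq_map, List.map_cons, List.map_map]
  refine congrArg₂ List.cons (by ring) ?_
  split_ifs with h2
  · apply List.map_congr_left
    intro k _
    simp [Function.comp]
    ring
  · simp

lemma pv_pyRange_two_nil {j n : Int} (h : ¬ j < n) :
    PySem.List.pyRange j n 2 = [] := by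
  rw [PySem.List.pyRange_of_pos _ _ (by norm_num), if_neg h]
  simp

-- loop A computes pvPairs of the (remaining) hex-char list
lemma pv_loopA_inv :
    ∀ (n : Nat) (t hs : List Char) (j : Nat) (acc : List (Int × Int × Int)),
      t.length ≤ n → hs.drop j = t →
      pvLoopA hs (PySem.List.pyRange (j : Int) (hs.length : Int) 2) acc = acc ++ pvPairs t := by
  intro n
  induction n with
  | zero =>
    intro t hs j acc hlen hdrop
    have ht : t = [] := List.length_eq_zero_iff.mp (Nat.le_zero.mp hlen)
    subst ht
    have hj : ¬ ((j : Int) < (hs.length : Int)) := by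
      have := List.drop_eq_nil_iff.mp hdrop
      omega
    rw [pv_pyRange_two_nil hj]
    simp [pvLoopA, pvPairs]
  | succ n ih =>
    intro t hs j acc hlen hdrop
    match t with
    | [] =>
      have hj : ¬ ((j : Int) < (hs.length : Int)) := by
        have := List.drop_eq_nil_iff.mp hdrop
        omega
      rw [pv_pyRange_two_nil hj]
      simp [pvLoopA, pvPairs]
    | [a] =>
      have hj : j < hs.length := by
        by_contra hge
        rw [List.drop_eq_nil_iff.mpr (by omega)] at hdrop
        exact absurd hdrop (by simp)
      have hj1 : j + 1 = hs.length := by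
        have := congrArg List.length hdrop
        simp at this
        omega
      rw [pv_pyRange_two_cons (by exact_mod_cast hj)]
      have hslice : PySem.List.slice hs (some (j : Int)) (some ((j : Int) + 2))
          = List.take 2 (List.drop j hs) := by
        have : ((j : Int) + 2) = ((j + 2 : Nat) : Int) := by push_cast; ring
        rw [this, PySem.List.slice_natCast]
        congr 1
        omega
      rw [pvLoopA, hslice, hdrop]
      simp [pvPairs]
    | a :: b :: rest =>
      have hj2 : j + 2 ≤ hs.length := by
        have := congrArg List.length hdrop
        simp at this
        omega
      rw [pv_pyRange_two_cons (by exact_mod_cast (by omega : j < hs.length))]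
      have hslice : PySem.List.slice hs (some (j : Int)) (some ((j : Int) + 2))
          = List.take 2 (List.drop j hs) := by
        have : ((j : Int) + 2) = ((j + 2 : Nat) : Int) := by push_cast; ring
        rw [this, PySem.List.slice_natCast]
        congr 1
        omega
      rw [pvLoopA, hslice, hdrop]
      have hdrop2 : hs.drop (j + 2) = rest := by
        have : hs.drop (j + 2) = (hs.drop j).drop 2 := by
          rw [List.drop_drop]
        rw [this, hdrop]
        rfl
      have hcast : ((j : Int) + 2) = ((j + 2 : Nat) : Int) := by push_cast; ring
      have hrec := ih rest hs (j + 2)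
        (acc ++ [(pvHex2 [a, b], pvHex2 [a, b], pvHex2 [a, b])])
        (by simp at hlen; omega) hdrop2
      have htake : List.take 2 (a :: b :: rest) = [a, b] := rfl
      rw [htake]
      rw [if_neg (by simp), hcast, hrec]
      simp [pvPairs]

-- loop B computes pvPairs of the filtered hex chars, with the pending nibble prepended
lemma pv_loopB_inv :
    ∀ (l : List Char) (acc : List (Int × Int × Int)),
      pvLoopB l none acc = acc ++ pvPairs (l.filter pvIsHexB) ∧
      ∀ p, pvLoopB l (some p) acc = acc ++ pvPairs (p :: l.filter pvIsHexB) := by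
  intro l
  induction l with
  | nil => intro acc; simp [pvLoopB, pvPairs]
  | cons c rest ih =>
    intro acc
    by_cases hc : pvIsHexB c = true
    · constructor
      · rw [pvLoopB, if_pos hc]
        rw [(ih acc).2 c, List.filter_cons_of_pos hc]
      · intro p
        rw [pvLoopB, if_pos hc]
        rw [(ih (acc ++ [(pvHex2 [p, c], pvHex2 [p, c], pvHex2 [p, c])])).1,
          List.filter_cons_of_pos hc]
        simp [pvPairs]
    · have hfc : List.filter pvIsHexB (c :: rest) = List.filter pvIsHexB rest :=
        List.filter_cons_of_neg (by simpa using hc)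
      constructor
      · rw [pvLoopB, if_neg hc, (ih acc).1, hfc]
      · intro p
        rw [pvLoopB, if_neg hc, (ih acc).2 p, hfc]

-- ===== VERDICT (by name: the statement is the Claim_ definition above) =====
theorem preloz_text_na_sedu_farbu_spec : Claim_equal_preloz_text_na_sedu_farbu := by
  intro text hdom
  unfold Spec_preloz_text_na_sedu_farbu preloz_text_na_sedu_farbu preloz_text_na_sedu_farbu_alt
  have hfilter : text.toList.filter pvIsHexA = text.toList.filter pvIsHexB := by
    apply List.filter_congr
    intro c hc
    have hdc : pvDomChar c = true := by
      have := hdom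
      unfold Dom_preloz_text_na_sedu_farbu pvDomStr at this
      exact List.all_eq_true.mp this c hc
    rw [pv_hex_eq c hdc]
  have hA := pv_loopA_inv (text.toList.filter pvIsHexA).length (text.toList.filter pvIsHexA)
    (text.toList.filter pvIsHexA) 0 [] (le_refl _) (by simp)
  have hB := (pv_loopB_inv text.toList []).1
  simp only [Nat.cast_zero] at hA
  rw [hA, hB, hfilter]
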